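-- pv_equiv track=rewrite | github.com/ketankokane94/Python-code-snippet | Lab7/hashmap.py | hash_function1
-- ===== SOURCE A (Python) =====
-- def hash_function1(string):
--     '''
--
--     :param string:
--     :return:
--     '''
--     # list of random prime numbers used to keep the hash bounded
--     prime_numbers = [179,127,233,283,103]
--     # we use summation to build up the final hash, so iniialise it to 0
--     sum = 0
--
--     for char in string:
--         # for every character in the string calculate the ordinal value
--         ordinal_value = ord(char)
--         # multiply the ordinal value with one of the prime number this is
--         # basically to pump up the values
--         ordinal_value *= prime_numbers[ordinal_value % 5]
--         # build up the final hash
--         sum += ordinal_value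
--     return sum
-- ===== SOURCE B (Python) =====
-- def hash_function1(string):
--     # Frequency-table variant with an arithmetic branch table: count characters
--     # once, then sum weight(ord(c)) * count over distinct characters.
--     def weight(o):
--         r = o % 5
--         if r == 0:
--             p = 179
--         elif r == 1:
--             p = 127
--         elif r == 2:
--             p = 233
--         elif r == 3:
--             p = 283
--         else:
--             p = 103
--         return o * p
--     freq = {}
--     for c in string:
--         freq[c] = freq.get(c, 0) + 1
--     return sum(weight(ord(c)) * n for c, n in freq.items())
-- ===== Notes on version B (the rewrite author's own statement) =====
-- stated objective: alternative
-- what changed: B builds a character-frequency table in one pass, replaces the prime list indexing by an arithmetic branch table on ord(c) % 5, and returns sum(weight(ord(c))*count) over the distinct characters instead of accumulating one term per occurrence.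
import Mathlib
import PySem

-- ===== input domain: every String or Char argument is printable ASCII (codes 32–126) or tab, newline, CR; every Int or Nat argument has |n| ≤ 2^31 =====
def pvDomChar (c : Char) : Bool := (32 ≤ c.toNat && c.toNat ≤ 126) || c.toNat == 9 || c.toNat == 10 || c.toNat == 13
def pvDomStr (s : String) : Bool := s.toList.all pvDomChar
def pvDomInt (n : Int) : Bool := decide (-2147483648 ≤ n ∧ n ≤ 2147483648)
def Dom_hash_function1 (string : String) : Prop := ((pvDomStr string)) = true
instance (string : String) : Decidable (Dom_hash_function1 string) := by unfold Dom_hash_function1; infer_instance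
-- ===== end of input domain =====

-- B replaces the per-occurrence summation by a character-frequency table plus
-- an arithmetic branch table on ord(c) % 5 and one weighted sum over the
-- distinct characters (alternative decomposition; same return value).


-- ===== PORT A =====
-- prime_numbers[ord % 5]: ord(c) ≥ 0 so the index is always 0..4 and pyGet? is
-- always some; .getD 0 never fires.
def hash_function1 (string : String) : Int :=
  let prime_numbers : List Int := [179, 127, 233, 283, 103]
  string.toList.foldl
    (fun sum char =>
      let ordinal_value : Int := (char.toNat : Int)
      let ordinal_value :=
        ordinal_value *
          ((PySem.List.pyGet? prime_numbers (PySem.Int.mod ordinal_value 5)).getD 0)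
      sum + ordinal_value)
    0

-- ===== PORT B =====
-- weight(o): branch on r = o % 5, in the order of Source B's if/elif chain.
def pvWeight (o : Int) : Int :=
  let r := PySem.Int.mod o 5
  let p : Int :=
    if r = 0 then 179
    else if r = 1 then 127
    else if r = 2 then 233
    else if r = 3 then 283
    else 103
  o * p

-- freq[c] = freq.get(c, 0) + 1 is the counter-building loop; then
-- sum(weight(ord(c)) * n for c, n in freq.items()).
def hash_function1_alt (string : String) : Int :=
  let freq : PySem.Dict Char Int :=
    string.toList.foldl (fun d c => d.insert c (d.getD c 0 + 1)) PySem.Dict.empty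
  (freq.items.map (fun p => pvWeight ((p.1.toNat : Int)) * p.2)).sum

-- ===== PRECONDITION & SPEC =====
def Spec_hash_function1 (string : String) (out : Int) : Prop := out = hash_function1_alt string
instance (string : String) (out : Int) : Decidable (Spec_hash_function1 string out) := by unfold Spec_hash_function1; infer_instance

-- ===== CLAIM (what is proved, stated in full; the proofs are below) =====
def Claim_equal_hash_function1 : Prop := ∀ (string : String), Dom_hash_function1 string → Spec_hash_function1 string (hash_function1 string)

-- ===== LEMMAS AND PROOFS =====

-- the per-character term A computes
def pvTerm (c : Char) : Int :=
  (c.toNat : Int) *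
    ((PySem.List.pyGet? [179, 127, 233, 283, 103] (PySem.Int.mod (c.toNat : Int) 5)).getD 0)

-- B's branch table agrees with A's list lookup on nonnegative ordinals
lemma pvWeight_eq_pvTerm (c : Char) : pvWeight ((c.toNat : Int)) = pvTerm c := by
  simp only [pvWeight, pvTerm]
  have h5 : (c.toNat : Int) % 5 = 0 ∨ (c.toNat : Int) % 5 = 1 ∨ (c.toNat : Int) % 5 = 2 ∨
      (c.toNat : Int) % 5 = 3 ∨ (c.toNat : Int) % 5 = 4 := by omega
  rcases h5 with h' | h' | h' | h' | h' <;>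
    simp [h', PySem.List.pyGet?, PySem.List.pyIdx?]

lemma hash_function1_eq_sum (s : String) :
    hash_function1 s = (s.toList.map pvTerm).sum := by
  simp only [hash_function1]
  rw [PySem.List.foldl_add]
  rw [zero_add]
  congr 1

lemma hash_function1_alt_eq_sum (s : String) :
    hash_function1_alt s =
      ((PySem.List.dedup s.toList).map
        (fun k => pvTerm k * (s.toList.count k : Int))).sum := by
  simp only [hash_function1_alt]
  rw [PySem.Dict.foldl_insert_getD_add_one_eq_counter, PySem.Dict.items_counter]
  simp only [PySem.List.dedup_eq_ofList, List.map_map]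
  congr 1
  apply List.map_congr_left
  intro k _
  simp [Function.comp, pvWeight_eq_pvTerm]

-- grouping occurrences by distinct character preserves the sum
lemma sum_dedup_weighted (cs : List Char) :
    ((PySem.List.dedup cs).map (fun k => pvTerm k * (cs.count k : Int))).sum =
      (cs.map pvTerm).sum := by
  have hfin : (PySem.List.dedup cs).toFinset = cs.toFinset := by
    ext x; simp
  rw [Eq.symm (List.sum_toFinset (fun k => pvTerm k * (cs.count k : Int))
        (PySem.List.nodup_dedup cs)),
      hfin, Finset.sum_list_map_count cs pvTerm]
  refine Finset.sum_congr rfl ?_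
  intro x _
  simp [mul_comm]

-- ===== VERDICT (by name: the statement is the Claim_ definition above) =====
theorem hash_function1_spec : Claim_equal_hash_function1 := by
  intro s _
  unfold Spec_hash_function1
  rw [hash_function1_eq_sum, hash_function1_alt_eq_sum, sum_dedup_weighted]
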